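-- pv_equiv track=rewrite | github.com/ArifPrabawa/SpecSense | app/parser.py | strip_title_block
-- ===== SOURCE A (Python) =====
-- def is_title_block_line(line: str) -> bool:
--     """
--     Determines whether a line is part of a document's title block.
--
--     Title block lines typically appear at the top of SRS documents and include
--     metadata such as project name, version, and date. These lines are not actual
--     section headers and should be excluded from requirement parsing.
--
--     Args:
--         line (str): A single line from the input document.
--
--     Returns:
--         bool: True if the line is part of the title block, False otherwise.
--     """
--     stripped = line.strip().lower()
--
--     known_exact = {
--         "software requirements specification",
--         "table of contents",
--     }
--
--     known_prefixes = ["project:", "version:", "date:"]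
--
--     for prefix in known_prefixes:
--         if stripped.startswith(prefix):
--             return True
--
--     return stripped in known_exact
--
-- def strip_title_block(lines: list[str]) -> list[str]:
--     """
--     Removes the document's initial title block from a list of lines.
--
--     Many SRS documents begin with metadata such as project title, version, date,
--     and a "Table of Contents" heading before the actual requirements begin.
--     This function removes those lines to prevent them from being misclassified
--     as section headers.
--
--     The title block is assumed to appear only at the top of the document.
--     Filtering stops as soon as the first line is encountered that does not match
--     known title block patterns.
--
--     Args:
--         lines (list[str]): Raw lines from the input document.
--
--     Returns:
--         list[str]: The remaining lines after removing the title block.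
--     """
--     filtered = []
--     in_title_block = True
--
--     for line in lines:
--         if in_title_block and is_title_block_line(line):
--             continue
--         if in_title_block and not line.strip():
--             continue  # skip blank lines right after title metadata
--         in_title_block = False
--         filtered.append(line)
--
--     return filtered
-- ===== SOURCE B (Python) =====
-- def is_title_block_line(line: str) -> bool:
--     stripped = line.strip().lower()
--
--     known_exact = {
--         "software requirements specification",
--         "table of contents",
--     }
--
--     known_prefixes = ["project:", "version:", "date:"]
--
--     for prefix in known_prefixes:
--         if stripped.startswith(prefix):
--             return True
--
--     return stripped in known_exact
--
--
-- def strip_title_block(lines: list[str]) -> list[str]: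
--     # Find the boundary: first line that is neither title-block metadata nor blank,
--     # then return everything from that line onward.
--     cutoff = len(lines)
--     for i, line in enumerate(lines):
--         if not is_title_block_line(line) and line.strip():
--             cutoff = i
--             break
--     return lines[cutoff:]
-- ===== Notes on version B (the rewrite author's own statement) =====
-- stated objective: simpler
-- what changed: Replaced the flag-carrying accumulate loop with a find-the-boundary-index-then-slice decomposition: B scans only for the first line that is neither title-block metadata nor blank and returns lines[cutoff:].
import Mathlib
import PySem

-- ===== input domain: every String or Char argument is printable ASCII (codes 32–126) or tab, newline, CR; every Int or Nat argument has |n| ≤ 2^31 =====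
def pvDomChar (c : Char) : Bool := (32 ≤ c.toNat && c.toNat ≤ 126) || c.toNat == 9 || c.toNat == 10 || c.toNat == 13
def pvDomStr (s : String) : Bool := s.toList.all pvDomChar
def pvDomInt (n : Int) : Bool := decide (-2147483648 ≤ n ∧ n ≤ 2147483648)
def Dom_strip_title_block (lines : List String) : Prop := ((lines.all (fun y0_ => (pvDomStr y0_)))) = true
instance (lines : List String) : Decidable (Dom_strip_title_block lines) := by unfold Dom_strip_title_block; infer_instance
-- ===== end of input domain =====

-- B replaces A's flag-carrying accumulate loop by a find-boundary-index-then-slice decomposition (objective: simpler).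


-- ===== PORT A =====
-- helper shared by both Pythons (identical in Source A and Source B)
def is_title_block_line (line : String) : Bool :=
  let stripped := PySem.Str.lower (PySem.Str.strip line)
  let known_exact : List String := ["software requirements specification", "table of contents"]
  let known_prefixes : List String := ["project:", "version:", "date:"]
  -- the for-loop with early 'return True' over known_prefixes:
  if known_prefixes.any (fun p => PySem.Str.startswith stripped p) then true
  else known_exact.contains stripped

-- loop body of A: state = (filtered, in_title_block)
def stripStepA (st : List String × Bool) (line : String) : List String × Bool :=
  if st.2 && is_title_block_line line then st
  else if st.2 && (PySem.Str.strip line == "") then st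
  else (st.1 ++ [line], false)

def strip_title_block (lines : List String) : List String :=
  (lines.foldl stripStepA ([], true)).1

-- ===== PORT B =====
-- the enumerate-loop of Source B that finds the cutoff index (len(lines) if no line qualifies)
def stripCutoff : List String → Nat
  | [] => 0
  | l :: ls =>
      if !is_title_block_line l && !(PySem.Str.strip l == "") then 0
      else stripCutoff ls + 1

-- lines[cutoff:] for the nonnegative cutoff ≤ len(lines) is List.drop
def strip_title_block_alt (lines : List String) : List String :=
  lines.drop (stripCutoff lines)

-- ===== PRECONDITION & SPEC =====
def Spec_strip_title_block (lines : List String) (out : List String) : Prop := out = strip_title_block_alt lines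
instance (lines : List String) (out : List String) : Decidable (Spec_strip_title_block lines out) := by unfold Spec_strip_title_block; infer_instance

-- ===== CLAIM (what is proved, stated in full; the proofs are below) =====
def Claim_equal_strip_title_block : Prop := ∀ (lines : List String), Dom_strip_title_block lines → Spec_strip_title_block lines (strip_title_block lines)

-- ===== LEMMAS AND PROOFS =====

-- once the flag is false, A's loop appends every remaining line
theorem foldl_stepA_false (ls : List String) (acc : List String) :
    (ls.foldl stripStepA (acc, false)).1 = acc ++ ls := by
  induction ls generalizing acc with
  | nil => simp
  | cons l ls ih =>
      simp only [List.foldl_cons, stripStepA]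
      simp [ih]

theorem foldl_stepA_true (ls : List String) (acc : List String) :
    (ls.foldl stripStepA (acc, true)).1 = acc ++ ls.drop (stripCutoff ls) := by
  induction ls generalizing acc with
  | nil => simp
  | cons l ls ih =>
      by_cases h1 : is_title_block_line l = true
      · simp only [List.foldl_cons, stripStepA, h1]
        simpa [stripCutoff, h1] using ih acc
      · by_cases h2 : (PySem.Str.strip l == "") = true
        · simp only [List.foldl_cons, stripStepA]
          simp only [h1, h2]
          simpa [stripCutoff, h1, h2] using ih acc
        · simp only [List.foldl_cons, stripStepA]
          simp only [h1, h2]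
          simp [stripCutoff, h1, h2, foldl_stepA_false]

-- ===== VERDICT (by name: the statement is the Claim_ definition above) =====
theorem strip_title_block_spec : Claim_equal_strip_title_block := by
  intro lines _
  unfold Spec_strip_title_block strip_title_block strip_title_block_alt
  simpa using foldl_stepA_true lines []
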